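-- pv_equiv track=rewrite | github.com/andriy-pro/audit-friendly-bingo-generator | src/bingo_gen/verify.py | compute_position_frequencies
-- ===== SOURCE A (Python) =====
-- from collections import Counter, defaultdict
-- from typing import Dict, List, Sequence, Tuple
--
-- def compute_position_frequencies(
--     cards: Sequence[Sequence[Sequence[int]]], R: int
-- ) -> Dict[str, Dict[int, int]]:
--     pos_counts: Dict[Tuple[int, int], Counter] = defaultdict(Counter)
--     if not cards:
--         return {}
--     m = len(cards[0])
--     n = len(cards[0][0]) if m > 0 else 0
--     for card in cards:
--         for i in range(m):
--             for j in range(n):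
--                 pos_counts[(i, j)][card[i][j]] += 1
--     out: Dict[str, Dict[int, int]] = {}
--     for (i, j), cn in pos_counts.items():
--         bucket = {x: cn.get(x, 0) for x in range(1, R + 1)}
--         out[f"({i},{j})"] = bucket
--     return out
-- ===== SOURCE B (Python) =====
-- def compute_position_frequencies(cards, R):
--     # Sort-then-scan instead of hash counting: for each position (i, j) sort the
--     # column of values across cards, then one linear two-pointer merge sweep over
--     # the sorted column and the increasing targets 1..R yields each bucket.
--     if not cards:
--         return {}
--     m = len(cards[0])
--     n = len(cards[0][0]) if m > 0 else 0
--     out = {}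
--     for i in range(m):
--         for j in range(n):
--             vals = sorted(card[i][j] for card in cards)
--             bucket = {}
--             k = 0
--             for x in range(1, R + 1):
--                 while k < len(vals) and vals[k] < x:
--                     k += 1
--                 c = 0
--                 while k < len(vals) and vals[k] == x:
--                     k += 1
--                     c += 1
--                 bucket[x] = c
--             out[f"({i},{j})"] = bucket
--     return out
-- ===== Notes on version B (the rewrite author's own statement) =====
-- stated objective: alternative
-- what changed: Replaces A's hash counting (a defaultdict(Counter) table filled card-major, then each counter projected onto 1..R with get) by sort-then-scan: for each position the column of values across cards is sorted once and the 1..R bucket is produced by a single linear two-pointer merge sweep over the sorted column, with no Counter or hashing at all.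
import Mathlib
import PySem

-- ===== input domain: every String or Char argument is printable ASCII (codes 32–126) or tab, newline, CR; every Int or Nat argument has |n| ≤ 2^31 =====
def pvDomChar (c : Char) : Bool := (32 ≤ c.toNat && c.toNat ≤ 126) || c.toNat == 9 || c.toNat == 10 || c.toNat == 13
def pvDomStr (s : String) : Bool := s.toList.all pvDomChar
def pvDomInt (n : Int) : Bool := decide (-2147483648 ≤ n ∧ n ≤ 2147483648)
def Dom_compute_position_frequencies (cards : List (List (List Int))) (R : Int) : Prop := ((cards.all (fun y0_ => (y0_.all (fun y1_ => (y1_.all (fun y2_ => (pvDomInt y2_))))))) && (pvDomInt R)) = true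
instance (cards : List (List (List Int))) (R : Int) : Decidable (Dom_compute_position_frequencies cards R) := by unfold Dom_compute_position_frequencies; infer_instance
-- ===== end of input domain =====

-- B replaces A's hash counting (defaultdict(Counter) table, then projecting each counter onto
-- 1..R) by sort-then-scan: per position it sorts the column of values and derives the bucket by
-- one linear two-pointer sweep over the sorted column; alternative algorithm, no speed claim.

-- ===== PORT A =====
-- pos_counts[(i,j)][card[i][j]] += 1 on a defaultdict(Counter) is modify (i,j) with default
-- empty dict, inside it modify the value with default 0.  card[i][j] is ported with pyGetD;
-- under Pre_ every such index is in range, so the default is never used.  The dict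
-- comprehension {x: cn.get(x,0) for x in range(1,R+1)} has distinct keys x, so its item list
-- is exactly the map over the range (exact).
def compute_position_frequencies (cards : List (List (List Int))) (R : Int) : List (String × List (Int × Int)) :=
  if cards = [] then []
  else
    let m : Int := (cards.headI.length : Int)
    let n : Int := if 0 < (cards.headI.length : Int) then (cards.headI.headI.length : Int) else 0
    let pos_counts : PySem.Dict (Int × Int) (PySem.Dict Int Int) :=
      cards.foldl (fun pc card =>
        (PySem.List.pyRange 0 m 1).foldl (fun pc i =>
          (PySem.List.pyRange 0 n 1).foldl (fun pc j =>
            pc.modify (i, j) PySem.Dict.empty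
              (fun cn => cn.modify (PySem.List.pyGetD (PySem.List.pyGetD card i []) j 0) 0 (· + 1))) pc) pc)
        PySem.Dict.empty
    (pos_counts.items.foldl (fun out q =>
        out.insert ("(" ++ PySem.Int.toStr q.1.1 ++ "," ++ PySem.Int.toStr q.1.2 ++ ")")
          ((PySem.List.pyRange 1 (R + 1) 1).map (fun x => (x, q.2.getD x 0)))) PySem.Dict.empty).items

-- ===== PORT B =====
-- Source B's 'while k < len(vals) and vals[k] < x: k += 1' (the skip phase of the sweep):
def pvSkipLt (vals : List Int) (x : Int) (k : Nat) : Nat :=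
  if h : k < vals.length then
    if vals[k] < x then pvSkipLt vals x (k + 1) else k
  else k
termination_by vals.length - k

-- Source B's 'while k < len(vals) and vals[k] == x: k += 1; c += 1' (the run-collection phase):
def pvTakeEq (vals : List Int) (x : Int) (k : Nat) (c : Int) : Int × Nat :=
  if h : k < vals.length then
    if vals[k] = x then pvTakeEq vals x (k + 1) (c + 1) else (c, k)
  else (c, k)
termination_by vals.length - k

-- Source B's inner 'for x in range(1, R+1)' loop building bucket; its keys x are pairwise distinct
-- and fresh, so each dict store bucket[x] = c is an append of the pair (x, c) (exact).
def pvBucket (vals : List Int) (R : Int) : List (Int × Int) :=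
  ((PySem.List.pyRange 1 (R + 1) 1).foldl
    (fun st x =>
      let k1 := pvSkipLt vals x st.2
      let ck := pvTakeEq vals x k1 0
      (st.1 ++ [(x, ck.1)], ck.2)) (([] : List (Int × Int)), 0)).1

def compute_position_frequencies_alt (cards : List (List (List Int))) (R : Int) : List (String × List (Int × Int)) :=
  if cards = [] then []
  else
    let m : Int := (cards.headI.length : Int)
    let n : Int := if 0 < (cards.headI.length : Int) then (cards.headI.headI.length : Int) else 0
    ((PySem.List.pyRange 0 m 1).foldl (fun out i =>
      (PySem.List.pyRange 0 n 1).foldl (fun out j =>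
        out.insert ("(" ++ PySem.Int.toStr i ++ "," ++ PySem.Int.toStr j ++ ")")
          (pvBucket (PySem.List.sorted (cards.map (fun card =>
              PySem.List.pyGetD (PySem.List.pyGetD card i []) j 0)) (fun v => v) false) R)) out)
      PySem.Dict.empty).items

-- ===== PRECONDITION & SPEC =====
-- Pre_ excludes exactly the inputs where Python A raises IndexError: when the first card has
-- m > 0 rows and its first row n > 0 entries, every card must have at least m rows whose
-- first m rows each have at least n entries (B raises there too).
def Pre_compute_position_frequencies (cards : List (List (List Int))) (R : Int) : Prop :=
  ∀ card ∈ cards, 0 < cards.headI.headI.length →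
    (cards.headI.length ≤ card.length ∧
     ∀ r ∈ card.take cards.headI.length, cards.headI.headI.length ≤ r.length)
instance (cards : List (List (List Int))) (R : Int) : Decidable (Pre_compute_position_frequencies cards R) := by unfold Pre_compute_position_frequencies; infer_instance

def pvWitness_compute_position_frequencies : List (List (List Int)) × Int :=
  ([[[1, 2], [3, 4]], [[2, 2], [3, 1]]], 4)

def Spec_compute_position_frequencies (cards : List (List (List Int))) (R : Int) (out : List (String × List (Int × Int))) : Prop := out = compute_position_frequencies_alt cards R
instance (cards : List (List (List Int))) (R : Int) (out : List (String × List (Int × Int))) : Decidable (Spec_compute_position_frequencies cards R out) := by unfold Spec_compute_position_frequencies; infer_instance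

-- ===== CLAIM (what is proved, stated in full; the proofs are below) =====
def Claim_equal_compute_position_frequencies : Prop := ∀ (cards : List (List (List Int))) (R : Int), Dom_compute_position_frequencies cards R → Pre_compute_position_frequencies cards R → Spec_compute_position_frequencies cards R (compute_position_frequencies cards R)

-- ===== LEMMAS AND PROOFS =====

-- the row-major position list range(m) x range(n) is duplicate-free
lemma pv_pairs_nodup (m n : Int) :
    ((PySem.List.pyRange 0 m 1).flatMap (fun i => (PySem.List.pyRange 0 n 1).map (fun j => (i, j)))).Nodup :=
  List.Nodup.product (PySem.List.nodup_pyRange_one 0 m) (PySem.List.nodup_pyRange_one 0 n)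

-- nested foldl over two lists = foldl over the flattened pair list
lemma pv_foldl_nest {α β σ : Type} (l1 : List α) (l2 : List β) (g : σ → α → β → σ) (s : σ) :
    List.foldl (fun s a => List.foldl (fun s b => g s a b) s l2) s l1
      = List.foldl (fun s x => g s x.1 x.2) s (l1.flatMap (fun a => l2.map (fun b => (a, b)))) := by
  induction l1 generalizing s with
  | nil => rfl
  | cons a t ih => simp [List.foldl_append, List.foldl_map, ih]

-- getD of a modify-loop keyed by `key`: only the hits at p matter
lemma pv_getD_foldl_modify_filter {κ ν β : Type} [BEq κ] [LawfulBEq κ] [DecidableEq κ]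
    (l : List β) (key : β → κ) (d0 : ν) (f : β → ν → ν) (d : PySem.Dict κ ν) (p : κ) :
    (List.foldl (fun d x => d.modify (key x) d0 (f x)) d l).getD p d0
      = List.foldl (fun w x => f x w) (d.getD p d0) (l.filter (fun x => decide (key x = p))) := by
  induction l generalizing d with
  | nil => rfl
  | cons a t ih =>
    simp only [List.foldl_cons, List.filter_cons]
    by_cases h : key a = p
    · subst h; simp [ih]
    · simp [h, ih, PySem.Dict.getD_modify, Ne.symm h]

-- the flattened cards x positions list, filtered at one position p ∈ P (P nodup)
lemma pv_bigList_filter {α : Type} (cards : List α) (P : List (Int × Int)) (p : Int × Int)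
    (hnd : P.Nodup) (hp : p ∈ P) :
    (cards.flatMap (fun c => P.map (fun q => (c, q)))).filter (fun x => decide (x.2 = p))
      = cards.map (fun c => (c, p)) := by
  induction cards with
  | nil => rfl
  | cons c t ih =>
    simp only [List.flatMap_cons, List.filter_append, List.map_cons, ih]
    rw [List.filter_map]
    have : P.filter (fun q => decide (q = p)) = [p] := by
      rw [List.filter_eq p, List.count_eq_one_of_mem hnd hp, List.replicate_one]
    simp only [Function.comp_def]
    rw [this]
    rfl

-- Set.ofList of P repeated once per card is P itself (cards nonempty, P nodup)
lemma pv_ofList_flatMap_const {α : Type} (cards : List α) (P : List (Int × Int))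
    (hnd : P.Nodup) (hc : cards ≠ []) :
    PySem.Set.ofList (cards.flatMap (fun _ => P)) = P := by
  obtain ⟨c, t, rfl⟩ := List.exists_cons_of_ne_nil hc
  rw [List.flatMap_cons, PySem.Set.ofList_append, PySem.Set.ofList_eq_self_of_nodup P hnd,
    PySem.Set.update_eq_append_filter]
  have : (PySem.Set.ofList (t.flatMap fun _ => P)).filter (fun y => !(PySem.Set.contains P y)) = [] := by
    rw [List.filter_eq_nil_iff]
    intro y hy
    have hyP : y ∈ P := by
      simp only [PySem.Set.mem_ofList, List.mem_flatMap] at hy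
      obtain ⟨_, _, h⟩ := hy
      exact h
    simp [PySem.Set.contains, hyP]
  rw [this, List.append_nil]

-- A's pos_counts, flattened: its item list pairs each position with its per-position counter
lemma pv_posCounts_items (cards : List (List (List Int))) (m n : Int) (hc : cards ≠ []) :
    (List.foldl (fun pc x => pc.modify x.2 PySem.Dict.empty
        (fun cn => cn.modify (PySem.List.pyGetD (PySem.List.pyGetD x.1 x.2.1 []) x.2.2 0) 0 (· + (1 : Int))))
        (PySem.Dict.empty : PySem.Dict (Int × Int) (PySem.Dict Int Int))
        (cards.flatMap (fun card =>
          ((PySem.List.pyRange 0 m 1).flatMap (fun i => (PySem.List.pyRange 0 n 1).map (fun j => (i, j)))).map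
            (fun p => (card, p))))).items
      = ((PySem.List.pyRange 0 m 1).flatMap (fun i => (PySem.List.pyRange 0 n 1).map (fun j => (i, j)))).map
          (fun p => (p, PySem.Dict.counter (cards.map (fun card =>
                PySem.List.pyGetD (PySem.List.pyGetD card p.1 []) p.2 0)))) := by
  have hP : ((PySem.List.pyRange 0 m 1).flatMap (fun i => (PySem.List.pyRange 0 n 1).map (fun j => (i, j)))).Nodup :=
    pv_pairs_nodup m n
  set P := (PySem.List.pyRange 0 m 1).flatMap (fun i => (PySem.List.pyRange 0 n 1).map (fun j => (i, j))) with hPdef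
  set L := cards.flatMap (fun card => P.map (fun p => (card, p))) with hLdef
  have hnd : (List.foldl (fun pc x => pc.modify x.2 PySem.Dict.empty
        (fun cn => cn.modify (PySem.List.pyGetD (PySem.List.pyGetD x.1 x.2.1 []) x.2.2 0) 0 (· + (1 : Int))))
        (PySem.Dict.empty : PySem.Dict (Int × Int) (PySem.Dict Int Int)) L).keys.Nodup :=
    PySem.Dict.nodup_keys_foldl_modify_key L (fun x => x.2) PySem.Dict.empty
      (fun _ x cn => cn.modify (PySem.List.pyGetD (PySem.List.pyGetD x.1 x.2.1 []) x.2.2 0) 0 (· + (1 : Int)))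
      PySem.Dict.empty PySem.Dict.nodup_keys_empty
  have hmap : L.map (fun x => x.2) = cards.flatMap (fun _ => P) := by
    rw [hLdef]
    simp [List.map_flatMap]
  have hkeys : (List.foldl (fun pc x => pc.modify x.2 PySem.Dict.empty
        (fun cn => cn.modify (PySem.List.pyGetD (PySem.List.pyGetD x.1 x.2.1 []) x.2.2 0) 0 (· + (1 : Int))))
        (PySem.Dict.empty : PySem.Dict (Int × Int) (PySem.Dict Int Int)) L).keys = P := by
    refine Eq.trans (PySem.Dict.keys_foldl_modify_key L (fun x => x.2) PySem.Dict.empty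
      (fun _ x cn => cn.modify (PySem.List.pyGetD (PySem.List.pyGetD x.1 x.2.1 []) x.2.2 0) 0 (· + (1 : Int)))
      PySem.Dict.empty) ?_
    have hke : (PySem.Dict.empty : PySem.Dict (Int × Int) (PySem.Dict Int Int)).keys = [] := rfl
    rw [hke, PySem.Set.update_nil_left, hmap, pv_ofList_flatMap_const cards P hP hc]
  rw [PySem.Dict.items_eq_map_keys _ hnd PySem.Dict.empty, hkeys]
  apply List.map_congr_left
  intro p hp
  have hg : (List.foldl (fun pc x => pc.modify x.2 PySem.Dict.empty
        (fun cn => cn.modify (PySem.List.pyGetD (PySem.List.pyGetD x.1 x.2.1 []) x.2.2 0) 0 (· + (1 : Int))))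
        (PySem.Dict.empty : PySem.Dict (Int × Int) (PySem.Dict Int Int)) L).getD p PySem.Dict.empty
      = PySem.Dict.counter (cards.map (fun card =>
          PySem.List.pyGetD (PySem.List.pyGetD card p.1 []) p.2 0)) := by
    refine Eq.trans (pv_getD_foldl_modify_filter L (fun x => x.2) PySem.Dict.empty
      (fun x cn => cn.modify (PySem.List.pyGetD (PySem.List.pyGetD x.1 x.2.1 []) x.2.2 0) 0 (· + (1 : Int)))
      PySem.Dict.empty p) ?_
    rw [hLdef, pv_bigList_filter cards P p hP hp, PySem.Dict.counter_eq_foldl,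
      List.foldl_map, List.foldl_map]
    rfl
  exact congrArg (fun c => (p, c)) hg

lemma pv_skipLt_drop (vals : List Int) (x : Int) (k : Nat) :
    vals.drop (pvSkipLt vals x k) = (vals.drop k).dropWhile (fun v => decide (v < x)) := by
  have H : ∀ n k, vals.length - k ≤ n →
      vals.drop (pvSkipLt vals x k) = (vals.drop k).dropWhile (fun v => decide (v < x)) := by
    intro n
    induction n with
    | zero =>
      intro k hk
      rw [pvSkipLt, dif_neg (by omega), List.drop_eq_nil_of_le (by omega)]
      rfl
    | succ n ih =>
      intro k hk
      rw [pvSkipLt]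
      by_cases h : k < vals.length
      · rw [dif_pos h, List.drop_eq_getElem_cons h, List.dropWhile_cons]
        by_cases hlt : vals[k] < x
        · rw [if_pos hlt, ih (k + 1) (by omega)]
          simp [hlt]
        · rw [if_neg hlt, if_neg (by simp [hlt])]
          exact List.drop_eq_getElem_cons h
      · rw [dif_neg h, List.drop_eq_nil_of_le (by omega)]
        rfl
  exact H _ k le_rfl

lemma pv_takeEq_spec (vals : List Int) (x : Int) (k : Nat) (c : Int) :
    (pvTakeEq vals x k c).1 = c + (((vals.drop k).takeWhile (fun v => decide (v = x))).length : Int)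
    ∧ vals.drop (pvTakeEq vals x k c).2 = (vals.drop k).dropWhile (fun v => decide (v = x)) := by
  have H : ∀ n k c, vals.length - k ≤ n →
      (pvTakeEq vals x k c).1 = c + (((vals.drop k).takeWhile (fun v => decide (v = x))).length : Int)
      ∧ vals.drop (pvTakeEq vals x k c).2 = (vals.drop k).dropWhile (fun v => decide (v = x)) := by
    intro n
    induction n with
    | zero =>
      intro k c hk
      rw [pvTakeEq, dif_neg (by omega), List.drop_eq_nil_of_le (by omega)]
      simp
    | succ n ih =>
      intro k c hk
      rw [pvTakeEq]
      by_cases h : k < vals.length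
      · rw [dif_pos h, List.drop_eq_getElem_cons h, List.takeWhile_cons, List.dropWhile_cons]
        by_cases heq : vals[k] = x
        · rw [if_pos heq]
          obtain ⟨h1, h2⟩ := ih (k + 1) (c + 1) (by omega)
          refine ⟨?_, ?_⟩
          · rw [h1]; simp [heq]; ring
          · rw [h2]; simp [heq]
        · rw [if_neg heq]
          refine ⟨?_, ?_⟩
          · rw [if_neg (by simp [heq])]
            simp
          · rw [if_neg (by simp [heq])]
            exact List.drop_eq_getElem_cons h
      · rw [dif_neg h, List.drop_eq_nil_of_le (by omega)]
        simp
  exact H _ k c le_rfl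

lemma pv_dropWhile_lt (t : List Int) (x : Int) (hs : t.Pairwise (· ≤ ·)) :
    t.dropWhile (fun v => decide (v < x)) = t.filter (fun v => decide (x ≤ v)) := by
  induction t with
  | nil => rfl
  | cons a t ih =>
    rw [List.pairwise_cons] at hs
    rw [List.dropWhile_cons, List.filter_cons]
    by_cases h : a < x
    · rw [if_pos (by simp [h]), if_neg (by simp; omega), ih hs.2]
    · rw [if_neg (by simp; omega), if_pos (by simp; omega)]
      congr 1
      symm
      rw [List.filter_eq_self]
      intro b hb
      have := hs.1 b hb
      simp; omega

lemma pv_takeWhile_eq (t : List Int) (x : Int) (hs : t.Pairwise (· ≤ ·)) :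
    (t.filter (fun v => decide (x ≤ v))).takeWhile (fun v => decide (v = x))
      = t.filter (fun v => decide (v = x)) := by
  induction t with
  | nil => rfl
  | cons a t ih =>
    rw [List.pairwise_cons] at hs
    rw [List.filter_cons, List.filter_cons]
    rcases lt_trichotomy a x with h | h | h
    · rw [if_neg (by simp; omega), if_neg (by simp; omega)]
      exact ih hs.2
    · subst h
      rw [if_pos (by simp), if_pos (by simp), List.takeWhile_cons, if_pos (by simp)]
      rw [ih hs.2]
    · rw [if_pos (by simp; omega), if_neg (by simp; omega), List.takeWhile_cons,
        if_neg (by simp; omega)]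
      symm
      rw [List.filter_eq_nil_iff]
      intro b hb
      have := hs.1 b hb
      simp; omega

lemma pv_dropWhile_eq (t : List Int) (x : Int) (hs : t.Pairwise (· ≤ ·)) :
    (t.filter (fun v => decide (x ≤ v))).dropWhile (fun v => decide (v = x))
      = t.filter (fun v => decide (x < v)) := by
  induction t with
  | nil => rfl
  | cons a t ih =>
    rw [List.pairwise_cons] at hs
    rw [List.filter_cons, List.filter_cons]
    rcases lt_trichotomy a x with h | h | h
    · rw [if_neg (by simp; omega), if_neg (by simp; omega)]
      exact ih hs.2
    · subst h
      rw [if_pos (by simp), if_neg (by simp), List.dropWhile_cons, if_pos (by simp)]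
      exact ih hs.2
    · rw [if_pos (by simp; omega), if_pos (by simp; omega), List.dropWhile_cons,
        if_neg (by simp; omega)]
      congr 1
      have h1 : t.filter (fun v => decide (x ≤ v)) = t := List.filter_eq_self.mpr (by
        intro b hb; have := hs.1 b hb; simp; omega)
      have h2 : t.filter (fun v => decide (x < v)) = t := List.filter_eq_self.mpr (by
        intro b hb; have := hs.1 b hb; simp; omega)
      rw [h1, h2]

lemma pv_count_filter_len (l : List Int) (x : Int) :
    ((l.filter (fun v => decide (v = x))).length : Int) = (l.count x : Int) := by
  rw [List.count_eq_countP, List.countP_eq_length_filter]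
  congr 2

lemma pv_sweep (vals : List Int) (hs : vals.Pairwise (· ≤ ·)) (xs : List Int)
    (hxs : xs.Pairwise (· < ·)) (acc : List (Int × Int)) (k : Nat)
    (hk : ∀ y ∈ xs, (vals.drop k).count y = vals.count y) :
    (xs.foldl (fun st x =>
        (st.1 ++ [(x, (pvTakeEq vals x (pvSkipLt vals x st.2) 0).1)],
         (pvTakeEq vals x (pvSkipLt vals x st.2) 0).2)) (acc, k)).1
      = acc ++ xs.map (fun x => (x, (vals.count x : Int))) := by
  induction xs generalizing acc k with
  | nil => simp
  | cons x xs ih =>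
    rw [List.pairwise_cons] at hxs
    simp only [List.foldl_cons, List.map_cons]
    have hts : (vals.drop k).Pairwise (· ≤ ·) := hs.sublist (List.drop_sublist k vals)
    have hd1 : vals.drop (pvSkipLt vals x k) = (vals.drop k).filter (fun v => decide (x ≤ v)) := by
      rw [pv_skipLt_drop, pv_dropWhile_lt _ _ hts]
    have hc : (pvTakeEq vals x (pvSkipLt vals x k) 0).1 = (vals.count x : Int) := by
      rw [(pv_takeEq_spec vals x (pvSkipLt vals x k) 0).1, hd1, pv_takeWhile_eq _ _ hts, zero_add,
        pv_count_filter_len, hk x (List.mem_cons_self)]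
    have hd2 : vals.drop (pvTakeEq vals x (pvSkipLt vals x k) 0).2
        = (vals.drop k).filter (fun v => decide (x < v)) := by
      rw [(pv_takeEq_spec vals x (pvSkipLt vals x k) 0).2, hd1, pv_dropWhile_eq _ _ hts]
    rw [hc, ih hxs.2 (acc ++ [(x, (vals.count x : Int))]) _ ?_, List.append_assoc]
    · rfl
    · intro y hy
      rw [hd2, List.count_filter (by simp [hxs.1 y hy]), hk y (List.mem_cons_of_mem _ hy)]

lemma pv_bucket_eq (col : List Int) (R : Int) :
    pvBucket (PySem.List.sorted col (fun v => v) false) R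
      = (PySem.List.pyRange 1 (R + 1) 1).map (fun x => (x, (PySem.Dict.counter col).getD x 0)) := by
  unfold pvBucket
  rw [pv_sweep (PySem.List.sorted col (fun v => v) false)
      (by simpa using PySem.List.sorted_pairwise col (fun v => v))
      (PySem.List.pyRange 1 (R + 1) 1) (PySem.List.pairwise_lt_pyRange_one 1 (R + 1))
      [] 0 (fun y _ => rfl), List.nil_append]
  apply List.map_congr_left
  intro x _
  rw [PySem.Dict.getD_counter, (PySem.List.sorted_perm col (fun v => v) false).count_eq]

-- the nonempty-cards branch: both ports build the same out dict
lemma pv_main (cards : List (List (List Int))) (R : Int) (hc : cards ≠ []) :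
    compute_position_frequencies cards R = compute_position_frequencies_alt cards R := by
  unfold compute_position_frequencies compute_position_frequencies_alt
  rw [if_neg hc, if_neg hc]
  simp only [pv_foldl_nest, Prod.mk.eta]
  rw [pv_posCounts_items cards _ _ hc]
  simp only [List.foldl_map, pv_bucket_eq]

-- ===== VERDICT (by name: the statement is the Claim_ definition above) =====
theorem compute_position_frequencies_spec : Claim_equal_compute_position_frequencies := by
  intro cards R _ _
  unfold Spec_compute_position_frequencies
  by_cases hc : cards = []
  · subst hc; rfl
  · exact pv_main cards R hc
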